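-- pv_equiv track=rewrite | github.com/iKostanOrg/codewars | kyu_6/decipher_this/solution.py | decipher_this
-- ===== SOURCE A (Python) =====
-- def last_digit_index(word: str) -> int:
--     index = 0
--     for char in word:
--         if char.isdigit():
--             index += 1
--         else:
--             break
--
--     return index
--
-- def decipher_this(string: str) -> str:
--     """
--     Given a secret message that you need to decipher.
--
--     For each word:
--      * the second and the last letter is switched (e.g. Hello becomes Holle)
--      * the first letter is replaced by its character code (e.g. H becomes 72)
--
--     Note: there are no special characters used, only letters and spaces
--
--     :param string:
--     :return:
--     """
--     if not string:
--         return ""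
--
--     results = list()
--     for word in string.split(' '):
--
--         last_digit: int = last_digit_index(word)
--         char: str = chr(int(word[0: last_digit]))
--
--         if len(word[last_digit:]) == 0:
--             results.append("{}".format(char))
--         elif len(word[last_digit:]) == 1:
--             results.append("{}{}".format(char,
--                                          word[last_digit:]))
--         elif len(word[last_digit:]) == 2:
--             results.append("{}{}{}".format(char,
--                                            word[-1],
--                                            word[last_digit]))
--         else:
--             results.append("{}{}{}{}".format(char,
--                                              word[-1],
--                                              word[last_digit + 1: -1],
--                                              word[last_digit]))
--
--     return ' '.join(results)
-- ===== SOURCE B (Python) =====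
-- def decipher_this(string: str) -> str:
--     """Single character-level scan (state machine): no split(), no slicing.
--     While scanning, accumulate the current word's digit prefix and its letters;
--     on a space (or at the end) emit chr(code) plus the letters with first/last
--     swapped when there are at least two."""
--     if not string:
--         return ""
--     out = []        # emitted output pieces
--     digits = []     # digit prefix of the current word
--     letters = []    # remaining letters of the current word
--
--     def flush():
--         out.append(chr(int(''.join(digits))))
--         if len(letters) >= 2:
--             letters[0], letters[-1] = letters[-1], letters[0]
--         out.extend(letters)
--
--     for ch in string:
--         if ch == ' ':
--             flush()
--             out.append(' ')
--             digits.clear()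
--             letters.clear()
--         elif ch.isdigit() and not letters:
--             digits.append(ch)
--         else:
--             letters.append(ch)
--     flush()
--     return ''.join(out)
-- ===== Notes on version B (the rewrite author's own statement) =====
-- stated objective: alternative
-- what changed: Replaces A's split-into-words pass plus per-word digit-counting helper, slicing and four-way length dispatch by a single character-level state-machine scan of the whole string that accumulates each word's digit prefix and letters and flushes (chr + conditional first/last swap) at each space and at the end.
-- outside the precondition, e.g. on decipher_this(' '): A raises ValueError, B raises ValueError; on decipher_this('1114112a'): A raises ValueError, B raises ValueError
import Mathlib
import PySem

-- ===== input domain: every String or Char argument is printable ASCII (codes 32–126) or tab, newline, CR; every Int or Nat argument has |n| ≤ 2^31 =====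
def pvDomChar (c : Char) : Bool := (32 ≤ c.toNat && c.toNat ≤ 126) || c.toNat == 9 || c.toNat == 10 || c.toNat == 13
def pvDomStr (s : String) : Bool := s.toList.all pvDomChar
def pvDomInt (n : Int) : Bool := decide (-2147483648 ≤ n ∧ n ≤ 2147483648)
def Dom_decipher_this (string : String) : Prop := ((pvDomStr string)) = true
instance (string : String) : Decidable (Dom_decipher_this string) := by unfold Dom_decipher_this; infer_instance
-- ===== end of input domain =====

-- B: one character-level state-machine scan over the string (no split, no slicing),
-- accumulating each word's digit prefix and letters and flushing at spaces/end,
-- instead of A's split + digit-counting helper + four-way length dispatch (objective: alternative).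


-- ===== PORT A =====
-- helper last_digit_index: for char in word: if char.isdigit(): index += 1 else: break
def last_digit_index_loop : List Char → Int → Int
  | [], index => index
  | c :: cs, index =>
      if PySem.Chars.isdigit c then last_digit_index_loop cs (index + 1) else index

def last_digit_index (word : List Char) : Int := last_digit_index_loop word 0

-- the body of A's for-loop over words (chr(n) is ported by hand as Char.ofNat n.toNat:
-- exact for 0 ≤ n ≤ 0x10FFFF excluding surrogates, which is what Pre_ admits;
-- int(…) → ofChars?, its ValueError (= none) replaced by .getD 0 only outside Pre_)
def pvWordA (word : List Char) : List Char :=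
  let last_digit : Int := last_digit_index word
  let ch : Char :=
    Char.ofNat ((PySem.Int.ofChars? (PySem.List.slice word (some 0) (some last_digit))).getD 0).toNat
  if PySem.List.len (PySem.List.slice word (some last_digit) none) = 0 then
    [ch]
  else if PySem.List.len (PySem.List.slice word (some last_digit) none) = 1 then
    ch :: PySem.List.slice word (some last_digit) none
  else if PySem.List.len (PySem.List.slice word (some last_digit) none) = 2 then
    [ch, PySem.List.pyGetD word (-1) ' ', PySem.List.pyGetD word last_digit ' ']
  else
    ch :: PySem.List.pyGetD word (-1) ' ' ::
      (PySem.List.slice word (some (last_digit + 1)) (some (-1)) ++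
        [PySem.List.pyGetD word last_digit ' '])

def decipher_this (string : String) : String :=
  if string = "" then "" else
  String.ofList (PySem.Chars.join [' ']
    ((PySem.Chars.splitOn string.toList [' ']).foldl (fun results word => results ++ [pvWordA word]) []))

-- ===== PORT B =====
-- flush(): out.append(chr(int(''.join(digits)))); conditional in-place swap of
-- letters[0]/letters[-1]; out.extend(letters).  chr / int ported as in pvWordA.
def pvRender (out digits letters : List Char) : List Char :=
  let letters' :=
    if 2 ≤ letters.length then
      PySem.List.pySetD (PySem.List.pySetD letters 0 (PySem.List.pyGetD letters (-1) ' '))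
        (-1) (PySem.List.pyGetD letters 0 ' ')
    else letters
  out ++ [Char.ofNat ((PySem.Int.ofChars? digits).getD 0).toNat] ++ letters'

-- the body of B's for-loop over the characters of the string
def pvStepB (st : List Char × List Char × List Char) (ch : Char) :
    List Char × List Char × List Char :=
  if ch = ' ' then (pvRender st.1 st.2.1 st.2.2 ++ [' '], [], [])
  else if PySem.Chars.isdigit ch && st.2.2.isEmpty then (st.1, st.2.1 ++ [ch], st.2.2)
  else (st.1, st.2.1, st.2.2 ++ [ch])

def decipher_this_alt (string : String) : String :=
  if string = "" then "" else
  let st := string.toList.foldl pvStepB ([], [], [])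
  String.ofList (pvRender st.1 st.2.1 st.2.2)

-- ===== PRECONDITION & SPEC =====
-- Pre_ excludes inputs where Python A raises (a word with no digit prefix → int('') ValueError;
-- a code above 0x10FFFF → chr ValueError/OverflowError) and, although A returns there, words whose
-- code is a UTF-16 surrogate (0xD800–0xDFFF): Python's chr returns a lone-surrogate str that a
-- Lean String/Char cannot represent.
def Pre_decipher_this (string : String) : Prop :=
  string = "" ∨ ∀ w ∈ PySem.Chars.splitOn string.toList [' '],
    (w.takeWhile PySem.Chars.isdigit) ≠ [] ∧
    ((PySem.Int.ofChars? (w.takeWhile PySem.Chars.isdigit)).getD 0 < 55296 ∨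
      (57344 ≤ (PySem.Int.ofChars? (w.takeWhile PySem.Chars.isdigit)).getD 0 ∧
       (PySem.Int.ofChars? (w.takeWhile PySem.Chars.isdigit)).getD 0 ≤ 1114111))
instance (string : String) : Decidable (Pre_decipher_this string) := by
  unfold Pre_decipher_this; infer_instance

def pvWitness_decipher_this : String := "72olle 103doo 100ya"

def Spec_decipher_this (string : String) (out : String) : Prop := out = decipher_this_alt string
instance (string : String) (out : String) : Decidable (Spec_decipher_this string out) := by
  unfold Spec_decipher_this; infer_instance

-- ===== CLAIM (what is proved, stated in full; the proofs are below) =====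
def Claim_equal_decipher_this : Prop :=
  ∀ (string : String), Dom_decipher_this string → Pre_decipher_this string →
    Spec_decipher_this string (decipher_this string)

-- ===== LEMMAS AND PROOFS =====

-- structural description of splitting on a single space, for the proofs only
def pvSplitSp : List Char → List (List Char)
  | [] => [[]]
  | c :: rest =>
      let r := pvSplitSp rest
      if c = ' ' then [] :: r else (c :: r.headI) :: r.tail

lemma pvSplitSp_ne_nil (l : List Char) : pvSplitSp l ≠ [] := by
  cases l with
  | nil => simp [pvSplitSp]
  | cons c rest => simp only [pvSplitSp]; split <;> simp

lemma pv_go_eq (fuel : Nat) :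
    ∀ (l cur : List Char) (acc : List (List Char)), l.length < fuel →
      PySem.Chars.splitOn.go [' '] fuel l cur acc
        = acc.reverse ++ (pvSplitSp l).modifyHead (cur.reverse ++ ·) := by
  induction fuel with
  | zero => intro l cur acc h; omega
  | succ f ih =>
      intro l cur acc h
      cases l with
      | nil =>
          simp [PySem.Chars.splitOn.go, pvSplitSp, List.modifyHead]
      | cons c rest =>
          by_cases hc : c = ' '
          · subst hc
            rw [PySem.Chars.splitOn.go]
            have hpre : [' '].isPrefixOf (' ' :: rest) = true := by simp [List.isPrefixOf]
            simp only [hpre, if_true, List.length_cons] at *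
            rw [show List.drop (([] : List Char).length + 1) (' ' :: rest) = rest from rfl,
              ih rest [] (cur.reverse :: acc) (by simpa using h)]
            simp only [pvSplitSp]
            cases hsp : pvSplitSp rest with
            | nil => exact absurd hsp (pvSplitSp_ne_nil rest)
            | cons a t => simp [List.modifyHead]
          · rw [PySem.Chars.splitOn.go]
            have hpre : [' '].isPrefixOf (c :: rest) = false := by
              simp [List.isPrefixOf]; intro hh; exact hc hh.symm
            simp only [hpre] at *
            rw [ih rest (c :: cur) acc (by simp at h ⊢; omega)]
            simp only [pvSplitSp, if_neg hc]
            cases hsp : pvSplitSp rest with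
            | nil => exact absurd hsp (pvSplitSp_ne_nil rest)
            | cons a t => simp [List.modifyHead]

lemma pv_splitOn_eq (l : List Char) :
    PySem.Chars.splitOn l [' '] = pvSplitSp l := by
  rw [PySem.Chars.splitOn, pv_go_eq (l.length + 1) l [] [] (by omega)]
  cases hsp : pvSplitSp l with
  | nil => exact absurd hsp (pvSplitSp_ne_nil l)
  | cons a t => simp [List.modifyHead]

lemma pv_ldi_loop (w : List Char) :
    ∀ k : Int, last_digit_index_loop w k = k + ((w.takeWhile PySem.Chars.isdigit).length : Int) := by
  induction w with
  | nil => intro k; simp [last_digit_index_loop]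
  | cons c cs ih =>
      intro k
      by_cases h : PySem.Chars.isdigit c = true
      · simp [last_digit_index_loop, h, ih]; ring
      · simp [last_digit_index_loop, h]

lemma pv_set_last {α : Type} (l : List α) (v : α) (h : l ≠ []) :
    l.set (l.length - 1) v = l.dropLast ++ [v] := by
  induction l with
  | nil => exact absurd rfl h
  | cons a l ih =>
      cases l with
      | nil => simp
      | cons b l' =>
          simp only [List.length_cons, Nat.add_sub_cancel, List.set_cons_succ,
            List.dropLast_cons₂, List.cons_append]
          have := ih (by simp)
          simpa using this

lemma pv_takeWhile_eq (d l : List Char)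
    (hd : ∀ c ∈ d, PySem.Chars.isdigit c = true)
    (hl : l = [] ∨ PySem.Chars.isdigit l.headI = false) :
    (d ++ l).takeWhile PySem.Chars.isdigit = d ∧
    (d ++ l).dropWhile PySem.Chars.isdigit = l := by
  induction d with
  | nil =>
      rcases hl with h | h
      · simp [h]
      · cases l with
        | nil => simp
        | cons a t =>
            simp only [List.headI] at h
            simp [h]
  | cons c d ih =>
      have hc : PySem.Chars.isdigit c = true := hd c (by simp)
      have := ih (fun x hx => hd x (by simp [hx]))
      simp [hc, this.1, this.2]

lemma pv_render_eq (d l : List Char)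
    (hd : ∀ c ∈ d, PySem.Chars.isdigit c = true)
    (hl : l = [] ∨ PySem.Chars.isdigit l.headI = false) :
    pvRender [] d l = pvWordA (d ++ l) := by
  obtain ⟨htw, hdw⟩ := pv_takeWhile_eq d l hd hl
  have hld : last_digit_index (d ++ l) = (d.length : Int) := by
    rw [last_digit_index, pv_ldi_loop, htw]; ring
  have hsliceA : PySem.List.slice (d ++ l) (some 0) (some (d.length : Int)) = d := by
    rw [PySem.List.slice_zero_start, PySem.List.slice_to_natCast, List.take_left]
  have hrest : PySem.List.slice (d ++ l) (some (d.length : Int)) none = l := by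
    rw [PySem.List.slice_from_natCast, List.drop_left]
  simp only [pvWordA, pvRender, hld, hsliceA, hrest, List.nil_append]
  rcases l with _ | ⟨x, t'⟩
  · simp [PySem.List.len]
  rcases t' with _ | ⟨y, ys⟩
  · simp [PySem.List.len]
  have htne : (x :: y :: ys : List Char) ≠ [] := by simp
  have hwne : d ++ x :: y :: ys ≠ [] := by simp
  have hlast : PySem.List.pyGetD (d ++ x :: y :: ys) (-1) ' ' = (x :: y :: ys).getLast htne := by
    rw [PySem.List.pyGetD_neg_one _ ' ' hwne]
    exact List.getLast_append_of_ne_nil _ htne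
  have hfirst : PySem.List.pyGetD (d ++ x :: y :: ys) (d.length : Int) ' ' = x := by
    rw [PySem.List.pyGetD_natCast, List.getD_eq_getElem?_getD,
      List.getElem?_append_right (Nat.le_refl _)]
    simp
  have hmid : PySem.List.slice (d ++ x :: y :: ys) (some ((d.length : Int) + 1)) (some (-1)) =
      (y :: ys).dropLast := by
    have h1 : ((d.length : Int) + 1) = ((d.length + 1 : Nat) : Int) := by push_cast; ring
    rw [h1]
    simp only [PySem.List.slice, PySem.List.clampIdx_natCast, PySem.List.clampIdx_neg_one]
    have h2 : min (d.length + 1) (d ++ x :: y :: ys).length = d.length + 1 := by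
      simp only [List.length_append, List.length_cons]; omega
    have hdrop : List.drop (d.length + 1) (d ++ x :: y :: ys) = y :: ys := by
      rw [← List.drop_drop, List.drop_left]; rfl
    have h5 : (d ++ x :: y :: ys).length - 1 - (d.length + 1) = ys.length := by
      simp only [List.length_append, List.length_cons]; omega
    rw [h2, hdrop, h5]
    have h6 : ys.length = (y :: ys).length - 1 := by simp
    rw [h6, ← List.dropLast_eq_take]
  have hswap :
      PySem.List.pySetD (PySem.List.pySetD (x :: y :: ys) 0
          (PySem.List.pyGetD (x :: y :: ys) (-1) ' '))
        (-1) (PySem.List.pyGetD (x :: y :: ys) 0 ' ') =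
      (x :: y :: ys).getLast htne :: ((y :: ys).dropLast ++ [x]) := by
    rw [PySem.List.pyGetD_neg_one _ ' ' htne, PySem.List.pyGetD_zero_cons]
    have hs0 : PySem.List.pySetD (x :: y :: ys) 0 ((x :: y :: ys).getLast htne) =
        (x :: y :: ys).getLast htne :: y :: ys := by
      simp [PySem.List.pySetD, PySem.List.pySet?, PySem.List.pyIdx?]
      rw [if_pos (by positivity)]
      rfl
    rw [hs0]
    have hu : PySem.List.pySetD ((x :: y :: ys).getLast htne :: y :: ys) (-1) x =
        ((x :: y :: ys).getLast htne :: y :: ys).set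
          (((x :: y :: ys).getLast htne :: y :: ys).length - 1) x := by
      simp [PySem.List.pySetD, PySem.List.pySet?, PySem.List.pyIdx?]
    rw [hu, pv_set_last _ _ (by simp)]
    simp
  rw [hswap]
  by_cases hys : ys = []
  · subst hys
    simp [PySem.List.len_eq, hlast, hfirst]
  · have h3 : ¬ (PySem.List.len (x :: y :: ys) = 0) := by
      simp only [PySem.List.len_eq, List.length_cons]; omega
    have h4 : ¬ (PySem.List.len (x :: y :: ys) = 1) := by
      simp only [PySem.List.len_eq, List.length_cons]; omega
    have h5 : ¬ (PySem.List.len (x :: y :: ys) = 2) := by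
      simp only [PySem.List.len_eq, List.length_cons]
      intro hlen2
      exact hys (List.eq_nil_of_length_eq_zero (by omega))
    have h6 : 2 ≤ (x :: y :: ys).length := by simp
    simp only [h3, h4, h5, h6, if_false, if_true, hlast, hfirst, hmid]
    rfl

lemma pv_scan (cs : List Char) :
    ∀ (out d l : List Char),
      (∀ c ∈ d, PySem.Chars.isdigit c = true) →
      (l = [] ∨ PySem.Chars.isdigit l.headI = false) →
      (let st := cs.foldl pvStepB (out, d, l);
       pvRender st.1 st.2.1 st.2.2)
        = out ++ PySem.Chars.join [' ']
            (((pvSplitSp cs).modifyHead ((d ++ l) ++ ·)).map pvWordA) := by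
  induction cs with
  | nil =>
      intro out d l hd hl
      simp only [List.foldl_nil, pvSplitSp, List.modifyHead, List.map,
        PySem.Chars.join_singleton, List.append_nil]
      rw [← pv_render_eq d l hd hl]
      simp [pvRender]
  | cons c cs ih =>
      intro out d l hd hl
      rw [List.foldl_cons]
      by_cases hc : c = ' '
      · subst hc
        rw [show pvStepB (out, d, l) ' ' = (pvRender out d l ++ [' '], [], []) from by
            simp [pvStepB],
          ih (pvRender out d l ++ [' ']) [] [] (by simp) (Or.inl rfl)]
        obtain ⟨h0, t0, hsp⟩ : ∃ h0 t0, pvSplitSp cs = h0 :: t0 := by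
          cases hs : pvSplitSp cs with
          | nil => exact absurd hs (pvSplitSp_ne_nil cs)
          | cons a t => exact ⟨a, t, rfl⟩
        simp only [pvSplitSp, hsp, if_true, List.modifyHead, List.map,
          List.nil_append]
        rw [show pvRender out d l = out ++ pvRender [] d l by simp [pvRender],
          pv_render_eq d l hd hl, PySem.Chars.join_cons_cons]
        simp
      · obtain ⟨h0, t0, hsp⟩ : ∃ h0 t0, pvSplitSp cs = h0 :: t0 := by
          cases hs : pvSplitSp cs with
          | nil => exact absurd hs (pvSplitSp_ne_nil cs)
          | cons a t => exact ⟨a, t, rfl⟩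
        by_cases hdig : (PySem.Chars.isdigit c && l.isEmpty) = true
        · have hle : l = [] := by
            rcases Bool.and_eq_true_iff.mp hdig with ⟨_, he⟩
            exact List.isEmpty_iff.mp he
          subst hle
          rw [show pvStepB (out, d, []) c = (out, d ++ [c], []) from by
              simp [pvStepB, hc, Bool.and_eq_true_iff.mp hdig |>.1],
            ih out (d ++ [c]) [] (by
              intro x hx
              rcases List.mem_append.mp hx with hx | hx
              · exact hd x hx
              · rcases List.mem_singleton.mp hx with rfl
                exact (Bool.and_eq_true_iff.mp hdig).1)
            (Or.inl rfl)]
          simp only [pvSplitSp, if_neg hc, hsp, List.modifyHead, List.map,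
            List.headI, List.tail, List.append_nil]
          simp
        · have hl' : l ++ [c] = [] ∨ PySem.Chars.isdigit (l ++ [c]).headI = false := by
            right
            cases l with
            | nil =>
                simp only [List.nil_append, List.headI]
                rcases not_and_or.mp (Bool.and_eq_true_iff.not.mp hdig) with h | h
                · exact Bool.not_eq_true _ |>.mp (by simpa using h)
                · exact absurd (by simp) h
            | cons a t =>
                rcases hl with h | h
                · simp at h
                · simpa using h
          rw [show pvStepB (out, d, l) c = (out, d, l ++ [c]) from by
              simp only [pvStepB, if_neg hc, if_neg hdig],
            ih out d (l ++ [c]) hd hl']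
          simp only [pvSplitSp, if_neg hc, hsp, List.modifyHead, List.map,
            List.headI, List.tail]
          simp

-- ===== VERDICT (by name: the statement is the Claim_ definition above) =====
theorem decipher_this_spec : Claim_equal_decipher_this := by
  intro s _ _
  unfold Spec_decipher_this decipher_this decipher_this_alt
  by_cases h : s = ""
  · simp [h]
  · simp only [h, if_false]
    rw [PySem.List.foldl_append_singleton_eq_map, List.nil_append, pv_splitOn_eq]
    have := pv_scan s.toList [] [] [] (by simp) (Or.inl rfl)
    simp only [List.nil_append] at this
    rw [this]
    cases pvSplitSp s.toList <;> simp [List.modifyHead]
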